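-- pv_equiv track=rewrite | github.com/JohanCalaT/DWSC | Actividad_1/CodigoReferencia/traderconfigs.src/traderconfigs.src/ui_traderconfigs.py | get_cerrada_detail
-- ===== SOURCE A (Python) =====
-- def get_candidate_contributions(config_tuple):
--     """Dado un tuple de (idx_1based, servicio), devuelve dict ordenado:
--     {candidato_0based: set_de_servicios_aportados}
--     """
--     from collections import OrderedDict
--     contributions = OrderedDict()
--     for (idx_1based, svc) in config_tuple:
--         idx_0based = idx_1based - 1
--         if idx_0based not in contributions:
--             contributions[idx_0based] = set()
--         contributions[idx_0based].add(svc)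
--     return contributions
--
-- def get_cerrada_detail(config_tuple, candidates):
--     """Devuelve detalle del analisis de cierre."""
--     contributions = get_candidate_contributions(config_tuple)
--     ofrecidos = set()
--     requeridos = set()
--     for i in contributions:
--         ofrecidos |= candidates[i]['O']
--         requeridos |= candidates[i]['I']
--     faltantes = requeridos - ofrecidos
--     return requeridos, ofrecidos, faltantes
-- ===== SOURCE B (Python) =====
-- def get_cerrada_detail(config_tuple, candidates):
--     """Detalle del cierre: union idempotente por ocurrencia, sin deduplicar indices."""
--     ofrecidos = set()
--     requeridos = set()
--     for idx_1based, _svc in config_tuple: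
--         ofrecidos |= candidates[idx_1based - 1]['O']
--         requeridos |= candidates[idx_1based - 1]['I']
--     return requeridos, ofrecidos, requeridos - ofrecidos
-- ===== Notes on version B (the rewrite author's own statement) =====
-- stated objective: simpler
-- what changed: Removed every deduplication structure (A's OrderedDict-of-service-sets helper and its keys pass): B unions candidates[idx-1]['O']/['I'] for every occurrence in config_tuple, correct because set union is idempotent, so duplicate indices contribute nothing new.
import Mathlib
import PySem

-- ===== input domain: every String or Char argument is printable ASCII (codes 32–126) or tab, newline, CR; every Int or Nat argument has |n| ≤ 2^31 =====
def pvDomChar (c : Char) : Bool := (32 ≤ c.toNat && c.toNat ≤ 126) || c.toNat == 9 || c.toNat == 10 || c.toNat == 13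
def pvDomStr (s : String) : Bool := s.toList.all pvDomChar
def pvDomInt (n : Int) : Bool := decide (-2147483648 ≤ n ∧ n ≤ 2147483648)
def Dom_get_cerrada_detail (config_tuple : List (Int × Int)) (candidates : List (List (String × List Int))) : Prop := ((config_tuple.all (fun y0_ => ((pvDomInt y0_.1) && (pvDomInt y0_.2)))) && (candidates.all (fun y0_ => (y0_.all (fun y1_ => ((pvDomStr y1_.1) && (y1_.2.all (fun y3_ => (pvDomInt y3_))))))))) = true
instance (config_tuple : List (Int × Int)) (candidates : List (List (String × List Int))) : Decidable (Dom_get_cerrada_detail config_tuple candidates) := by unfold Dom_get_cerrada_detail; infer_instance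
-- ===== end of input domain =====

-- B removes every deduplication structure (A's OrderedDict helper and its keys pass): it unions each
-- occurrence's O/I sets directly, correct because set union is idempotent — simpler, same cost.

-- ===== PORT A =====
-- candidates[i][key]: Python list index (negative allowed) then dict lookup (first match);
-- the defaults [] are reached only where Python raises (excluded by Pre_).
def pvLookupSvc (candidates : List (List (String × List Int))) (i : Int) (key : String) : List Int :=
  (((PySem.List.pyGet? candidates i).getD []).lookup key).getD []

-- body of A's first loop: if i not in contributions: contributions[i] = set(); contributions[i].add(svc)
def pvContribStep (d : PySem.Dict Int (PySem.Set Int)) (p : Int × Int) : PySem.Dict Int (PySem.Set Int) :=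
  let i := p.1 - 1
  let d' := if d.contains i then d else d.insert i ([] : PySem.Set Int)
  d'.modify i [] (fun s => PySem.Set.add s p.2)

def get_candidate_contributions (config_tuple : List (Int × Int)) : PySem.Dict Int (PySem.Set Int) :=
  config_tuple.foldl pvContribStep PySem.Dict.empty

-- body of A's second loop: ofrecidos |= candidates[i]['O']; requeridos |= candidates[i]['I']
def pvGatherStep (candidates : List (List (String × List Int)))
    (acc : PySem.Set Int × PySem.Set Int) (i : Int) : PySem.Set Int × PySem.Set Int :=
  (PySem.Set.union acc.1 (pvLookupSvc candidates i "O"),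
   PySem.Set.union acc.2 (pvLookupSvc candidates i "I"))

def get_cerrada_detail (config_tuple : List (Int × Int)) (candidates : List (List (String × List Int))) : List Int × List Int × List Int :=
  let contributions := get_candidate_contributions config_tuple
  let acc := contributions.keys.foldl (pvGatherStep candidates) (([] : PySem.Set Int), ([] : PySem.Set Int))
  (acc.2, acc.1, PySem.Set.diff acc.2 acc.1)

-- ===== PORT B =====
-- B's loop body: every occurrence unions its candidate's O/I sets in — no dedup, union is idempotent
def pvAltStep (candidates : List (List (String × List Int)))
    (acc : PySem.Set Int × PySem.Set Int) (p : Int × Int) : PySem.Set Int × PySem.Set Int :=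
  (PySem.Set.union acc.1 (pvLookupSvc candidates (p.1 - 1) "O"),
   PySem.Set.union acc.2 (pvLookupSvc candidates (p.1 - 1) "I"))

def get_cerrada_detail_alt (config_tuple : List (Int × Int)) (candidates : List (List (String × List Int))) : List Int × List Int × List Int :=
  let acc := config_tuple.foldl (pvAltStep candidates) (([] : PySem.Set Int), ([] : PySem.Set Int))
  (acc.2, acc.1, PySem.Set.diff acc.2 acc.1)

-- ===== PRECONDITION & SPEC =====
-- A raises IndexError when some idx_1based-1 is out of range of candidates (negative
-- indices wrap, Python-style) and KeyError when that candidate lacks an 'O' or 'I' key;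
-- Pre_ admits exactly the inputs where every referenced candidate exists and has both keys.
def Pre_get_cerrada_detail (config_tuple : List (Int × Int)) (candidates : List (List (String × List Int))) : Prop :=
  ∀ p ∈ config_tuple,
    ((PySem.List.pyGet? candidates (p.1 - 1)).map
      (fun l => (l.lookup "O").isSome && (l.lookup "I").isSome)).getD false = true
instance (config_tuple : List (Int × Int)) (candidates : List (List (String × List Int))) : Decidable (Pre_get_cerrada_detail config_tuple candidates) := by unfold Pre_get_cerrada_detail; infer_instance

def pvWitness_get_cerrada_detail : (List (Int × Int)) × (List (List (String × List Int))) :=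
  ([(1, 5), (2, 7)], [[("O", [5]), ("I", [7])], [("O", [7, 3]), ("I", [5, 3])]])

def Spec_get_cerrada_detail (config_tuple : List (Int × Int)) (candidates : List (List (String × List Int))) (out : List Int × List Int × List Int) : Prop := out = get_cerrada_detail_alt config_tuple candidates
instance (config_tuple : List (Int × Int)) (candidates : List (List (String × List Int))) (out : List Int × List Int × List Int) : Decidable (Spec_get_cerrada_detail config_tuple candidates out) := by unfold Spec_get_cerrada_detail; infer_instance

-- ===== CLAIM (what is proved, stated in full; the proofs are below) =====
def Claim_equal_get_cerrada_detail : Prop := ∀ (config_tuple : List (Int × Int)) (candidates : List (List (String × List Int))), Dom_get_cerrada_detail config_tuple candidates → Pre_get_cerrada_detail config_tuple candidates → Spec_get_cerrada_detail config_tuple candidates (get_cerrada_detail config_tuple candidates)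

-- ===== LEMMAS AND PROOFS =====

-- the list of first occurrences of idx_1based-1 in config_tuple that are not yet in `seen`
def pvFirstOcc (ct : List (Int × Int)) (seen : PySem.Set Int) : List Int :=
  match ct with
  | [] => []
  | p :: ct =>
    if PySem.Set.contains seen (p.1 - 1) then pvFirstOcc ct seen
    else (p.1 - 1) :: pvFirstOcc ct (PySem.Set.add seen (p.1 - 1))

-- the keys of A's contributions dict are exactly the first occurrences, in order
theorem pv_keys_contrib (ct : List (Int × Int)) :
    ∀ (d : PySem.Dict Int (PySem.Set Int)), d.keys.Nodup →
    (ct.foldl pvContribStep d).keys = d.keys ++ pvFirstOcc ct d.keys := by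
  induction ct with
  | nil => intro d _; simp [pvFirstOcc]
  | cons p ct ih =>
    intro d hnd
    have hc : d.contains (p.1 - 1) = PySem.Set.contains d.keys (p.1 - 1) := by
      by_cases h : (p.1 - 1) ∈ d.keys
      · rw [(PySem.Dict.contains_iff_mem_keys d _).mpr h,
            ((PySem.Set.contains_iff d.keys _).mpr h)]
      · rw [Bool.eq_false_iff.mpr (fun hct => h ((PySem.Dict.contains_iff_mem_keys d _).mp hct)),
            Bool.eq_false_iff.mpr (fun hct => h ((PySem.Set.contains_iff d.keys _).mp hct))]
    by_cases h : (p.1 - 1) ∈ d.keys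
    · have hct : d.contains (p.1 - 1) = true := (PySem.Dict.contains_iff_mem_keys d _).mpr h
      have hkeys : (pvContribStep d p).keys = d.keys := by
        simp only [pvContribStep, hct, if_pos]
        rw [PySem.Dict.keys_modify, PySem.Dict.keys_insert_of_contains _ _ hct]
      simp only [List.foldl_cons, pvFirstOcc, ← hc, hct, if_pos]
      rw [ih (pvContribStep d p) (hkeys ▸ hnd), hkeys]
    · have hct : d.contains (p.1 - 1) = false :=
        Bool.eq_false_iff.mpr (fun hc' => h ((PySem.Dict.contains_iff_mem_keys d _).mp hc'))
      have hkeys : (pvContribStep d p).keys = d.keys ++ [p.1 - 1] := by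
        simp only [pvContribStep, hct, Bool.false_eq_true, ite_false]
        rw [PySem.Dict.keys_modify,
            PySem.Dict.keys_insert_of_contains _ _ (PySem.Dict.contains_insert_self _ _ _),
            PySem.Dict.keys_insert_of_not_contains _ _ hct]
      have hnd' : (d.keys ++ [p.1 - 1]).Nodup := by
        simpa [List.nodup_append] using And.intro hnd (fun a ha (he : a = p.1 - 1) => h (he ▸ ha))
      simp only [List.foldl_cons, pvFirstOcc, ← hc, hct, Bool.false_eq_true, ite_false]
      rw [ih (pvContribStep d p) (hkeys ▸ hnd'), hkeys,
          PySem.Set.add_of_not_mem h, List.append_assoc]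
      rfl

-- unioning a subset changes nothing
theorem pv_union_eq_left (s t : PySem.Set Int) (h : ∀ x ∈ t, x ∈ s) :
    PySem.Set.union s t = s := by
  show PySem.Set.update s t = s
  rw [PySem.Set.update_eq_append_filter]
  have : (PySem.Set.ofList t).filter (fun y => !(PySem.Set.contains s y)) = [] := by
    rw [List.filter_eq_nil_iff]
    intro a ha
    simp [h a ((PySem.Set.mem_ofList _ _).mp ha)]
  rw [this, List.append_nil]

-- B's dedup-free loop equals A's gather loop over the first-occurrence list:
-- invariant: every seen index's O/I sets are already inside the accumulators
theorem pv_alt_eq_gather (cs : List (List (String × List Int))) (ct : List (Int × Int)) :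
    ∀ (seen : PySem.Set Int) (acc : PySem.Set Int × PySem.Set Int),
    (∀ i ∈ seen, (∀ x ∈ pvLookupSvc cs i "O", x ∈ acc.1) ∧
                 (∀ x ∈ pvLookupSvc cs i "I", x ∈ acc.2)) →
    ct.foldl (pvAltStep cs) acc = (pvFirstOcc ct seen).foldl (pvGatherStep cs) acc := by
  induction ct with
  | nil => intro seen acc _; simp [pvFirstOcc]
  | cons p ct ih =>
    intro seen acc hinv
    by_cases h : (p.1 - 1) ∈ seen
    · have hct : PySem.Set.contains seen (p.1 - 1) = true := (PySem.Set.contains_iff _ _).mpr h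
      have hstep : pvAltStep cs acc p = acc := by
        simp only [pvAltStep, pv_union_eq_left _ _ (hinv _ h).1,
                   pv_union_eq_left _ _ (hinv _ h).2]
      simp only [List.foldl_cons, pvFirstOcc, hct, if_pos, hstep]
      exact ih seen acc hinv
    · have hct : PySem.Set.contains seen (p.1 - 1) = false :=
        Bool.eq_false_iff.mpr (fun hc => h ((PySem.Set.contains_iff _ _).mp hc))
      simp only [List.foldl_cons, pvFirstOcc, hct, Bool.false_eq_true, ite_false]
      have hstep : pvAltStep cs acc p = pvGatherStep cs acc (p.1 - 1) := rfl
      rw [hstep]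
      apply ih
      intro i hi
      rcases (PySem.Set.mem_add _ _ _).mp hi with hi' | hi'
      · exact ⟨fun x hx => (PySem.Set.mem_update _ _ _).mpr (Or.inl ((hinv i hi').1 x hx)),
               fun x hx => (PySem.Set.mem_update _ _ _).mpr (Or.inl ((hinv i hi').2 x hx))⟩
      · subst hi'
        exact ⟨fun x hx => (PySem.Set.mem_update _ _ _).mpr (Or.inr hx),
               fun x hx => (PySem.Set.mem_update _ _ _).mpr (Or.inr hx)⟩

-- ===== VERDICT (by name: the statement is the Claim_ definition above) =====
theorem get_cerrada_detail_spec : Claim_equal_get_cerrada_detail := by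
  intro ct cs _ _
  unfold Spec_get_cerrada_detail get_cerrada_detail get_cerrada_detail_alt
    get_candidate_contributions
  simp only []
  rw [pv_keys_contrib ct PySem.Dict.empty (by simp [PySem.Dict.keys_empty]),
      PySem.Dict.keys_empty, List.nil_append,
      ← pv_alt_eq_gather cs ct [] ([], []) (by intro i hi; cases hi)]
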